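-- pv_equiv track=rewrite | github.com/gabriel-francischini/python-fatec-1st-semester-exercise-lists | invasao-sem-builtin.py | corrigir_dia_e_mes
-- ===== SOURCE A (Python) =====
-- def corrigir_dia_e_mes(dia, mes):
--     maximos_por_mes = [
--         31, # Dezembro
--         31, # Janeiro
--         28, # Fevereiro
--         31, # Março
--         30, # Abril
--         31, # Maio
--         30, # Junho
--         31, # Julho
--         31, # Agosto
--         30, # Setembro
--         31, # Outubro
--         30, # Novembro
--     ]
--
--     if dia > maximos_por_mes[mes]:
--         # Dia pertence ao próximo mês
--         dia = dia - maximos_por_mes[mes]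
--         mes = mes + 1
--
--         # Verifica se por acaso a data precisa de mais correções
--         return corrigir_dia_e_mes(dia, mes)
--     elif dia == 0:
--         # Dia '0' é para ser interpretado como dia 31 segundo a 1a folha do exercício
--         dia = 31
--
--         return corrigir_dia_e_mes(dia, mes)
--     elif dia < 0:
--         # Dia pertence ao mês anterior
--         if mes == 0:
--             mes = 11
--         else:
--             mes = mes - 1
--
--         dia = maximos_por_mes[mes]
--         # Verifica se por acaso a data precisa de mais correções
--         return corrigir_dia_e_mes(dia, mes)
--     else:
--         # A data está certa
--         return [dia, mes]
-- ===== SOURCE B (Python) =====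
-- def corrigir_dia_e_mes(dia, mes):
--     maximos_por_mes = [31, 31, 28, 31, 30, 31, 30, 31, 31, 30, 31, 30]
--     if dia < 0:
--         # the day belongs to the previous month: its last day
--         anterior = 11 if mes == 0 else mes - 1
--         return [maximos_por_mes[anterior], anterior]
--     d = 31 if dia == 0 else dia
--     # single forward scan with an accumulated day count instead of recursion
--     total = 0
--     for j in range(mes, 12):
--         if d <= total + maximos_por_mes[j]:
--             return [d - total, j]
--         total += maximos_por_mes[j]
--     raise ValueError("day out of range for the calendar")
-- ===== Notes on version B (the rewrite author's own statement) =====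
-- stated objective: alternative
-- what changed: A normalizes by recursive repeated subtraction of one month length per call; B does one forward scan over range(mes, 12) with an accumulated prefix-sum of month lengths (plus a direct previous-month case for dia < 0), no recursion; Pre_ excludes only inputs where A raises (IndexError from an out-of-range month index or a day past December).
import Mathlib
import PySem

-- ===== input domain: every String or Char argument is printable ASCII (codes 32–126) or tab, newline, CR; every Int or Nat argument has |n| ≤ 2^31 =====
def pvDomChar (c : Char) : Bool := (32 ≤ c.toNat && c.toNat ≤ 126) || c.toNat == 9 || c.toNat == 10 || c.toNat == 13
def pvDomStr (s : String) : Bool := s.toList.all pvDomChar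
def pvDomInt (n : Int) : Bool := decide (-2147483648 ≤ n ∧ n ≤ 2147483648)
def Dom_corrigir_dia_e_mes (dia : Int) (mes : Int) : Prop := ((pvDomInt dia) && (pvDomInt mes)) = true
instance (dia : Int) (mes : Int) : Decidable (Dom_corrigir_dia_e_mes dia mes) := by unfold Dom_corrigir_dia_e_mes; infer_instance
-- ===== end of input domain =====

-- B replaces A's repeated-subtraction recursion by one forward scan with an accumulated
-- day total over range(mes, 12) (prefix sums), plus a direct previous-month case for dia < 0;
-- objective: alternative decomposition, same exact values on Pre_.


-- ===== PORT A =====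
-- A's month-length table (index 0 = Dezembro), shared literal of both ports
def pvMaximos : List Int := [31, 31, 28, 31, 30, 31, 30, 31, 31, 30, 31, 30]

-- literal port of A's recursion; fuel only makes it total ([] = IndexError / out of fuel;
-- Pre_ keeps the recursion depth far below 100)
def pvA : Nat → Int → Int → List Int
  | 0, _, _ => []
  | fuel + 1, dia, mes =>
    match PySem.List.pyGet? pvMaximos mes with
    | none => []                                   -- IndexError on maximos_por_mes[mes]
    | some mx =>
      if dia > mx then
        pvA fuel (dia - mx) (mes + 1)
      else if dia = 0 then
        pvA fuel 31 mes
      else if dia < 0 then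
        let mes' := if mes = 0 then (11 : Int) else mes - 1
        match PySem.List.pyGet? pvMaximos mes' with
        | none => []                               -- IndexError on maximos_por_mes[mes]
        | some mx' => pvA fuel mx' mes'
      else
        [dia, mes]

def corrigir_dia_e_mes (dia : Int) (mes : Int) : List Int := pvA 100 dia mes

-- ===== PORT B =====
-- the scan of Source B: walk range(mes, 12) keeping the accumulated total ([] = ValueError)
def pvBloop (d : Int) (total : Int) : List Int → List Int
  | [] => []
  | j :: rest =>
    match PySem.List.pyGet? pvMaximos j with
    | none => []
    | some ln => if d ≤ total + ln then [d - total, j] else pvBloop d (total + ln) rest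

def corrigir_dia_e_mes_alt (dia : Int) (mes : Int) : List Int :=
  if dia < 0 then
    let anterior := if mes = 0 then (11 : Int) else mes - 1
    match PySem.List.pyGet? pvMaximos anterior with
    | none => []
    | some v => [v, anterior]
  else
    let d := if dia = 0 then (31 : Int) else dia
    pvBloop d 0 (PySem.List.pyRange mes 12)

-- ===== PRECONDITION & SPEC =====
-- Pre_ = exactly the inputs where A returns (no IndexError): mes within one Python
-- negative-index wrap of the table, and a positive dia no larger than the days remaining
-- up to December (table pvResto, indexed by mes+12).
def pvResto : List Int := [730, 699, 668, 640, 609, 579, 548, 518, 487, 456, 426, 395,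
                           365, 334, 303, 275, 244, 214, 183, 153, 122, 91, 61, 30]

def Pre_corrigir_dia_e_mes (dia : Int) (mes : Int) : Prop :=
  if dia < 0 then -11 ≤ mes ∧ mes ≤ 11
  else if dia = 0 then -12 ≤ mes ∧ mes ≤ 10
  else -12 ≤ mes ∧ mes ≤ 11 ∧ dia ≤ pvResto.getD (mes + 12).toNat 0
instance (dia : Int) (mes : Int) : Decidable (Pre_corrigir_dia_e_mes dia mes) := by
  unfold Pre_corrigir_dia_e_mes; infer_instance

def pvWitness_corrigir_dia_e_mes : Int × Int := (60, 2)

def Spec_corrigir_dia_e_mes (dia : Int) (mes : Int) (out : List Int) : Prop := out = corrigir_dia_e_mes_alt dia mes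
instance (dia : Int) (mes : Int) (out : List Int) : Decidable (Spec_corrigir_dia_e_mes dia mes out) := by unfold Spec_corrigir_dia_e_mes; infer_instance

-- ===== CLAIM (what is proved, stated in full; the proofs are below) =====
def Claim_equal_corrigir_dia_e_mes : Prop := ∀ (dia : Int) (mes : Int), Dom_corrigir_dia_e_mes dia mes → Pre_corrigir_dia_e_mes dia mes → Spec_corrigir_dia_e_mes dia mes (corrigir_dia_e_mes dia mes)

-- ===== LEMMAS AND PROOFS =====
set_option maxRecDepth 8192 in
set_option maxHeartbeats 4000000 in
theorem pv_pos_all : ((PySem.List.pyRange (-12) 12).all (fun mes =>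
    (PySem.List.pyRange 1 (pvResto.getD (mes + 12).toNat 0 + 1)).all (fun dia =>
      corrigir_dia_e_mes dia mes == corrigir_dia_e_mes_alt dia mes))) = true := by decide

set_option maxRecDepth 2048 in
theorem pv_zero_all : ((PySem.List.pyRange (-12) 11).all (fun mes =>
    corrigir_dia_e_mes 0 mes == corrigir_dia_e_mes_alt 0 mes)) = true := by decide

-- one unfold of pvA, stated as an equation (proved by rfl)
theorem pvA_unfold (fuel : Nat) (dia mes : Int) :
    pvA (fuel + 1) dia mes =
      match PySem.List.pyGet? pvMaximos mes with
      | none => []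
      | some mx =>
        if dia > mx then pvA fuel (dia - mx) (mes + 1)
        else if dia = 0 then pvA fuel 31 mes
        else if dia < 0 then
          match PySem.List.pyGet? pvMaximos (if mes = 0 then (11 : Int) else mes - 1) with
          | none => []
          | some mx' => pvA fuel mx' (if mes = 0 then (11 : Int) else mes - 1)
        else [dia, mes] := rfl

theorem pv_neg_dia_irrelevant_A (fuel : Nat) (dia mes : Int) (h : dia < 0) :
    pvA (fuel + 1) dia mes = pvA (fuel + 1) (-1) mes := by
  rw [pvA_unfold, pvA_unfold]
  cases hg : PySem.List.pyGet? pvMaximos mes with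
  | none => rfl
  | some mx =>
    have hmem := PySem.List.mem_of_pyGet?_eq_some pvMaximos hg
    have hmx : (0:Int) < mx := by
      simp only [pvMaximos, List.mem_cons, List.not_mem_nil, or_false] at hmem
      rcases hmem with h' | h' | h' | h' | h' | h' | h' | h' | h' | h' | h' | h' <;> omega
    simp only
    rw [if_neg (show ¬ dia > mx by omega), if_neg (show ¬ dia = 0 by omega), if_pos h,
        if_neg (show ¬ (-1:Int) > mx by omega), if_neg (show ¬ (-1:Int) = 0 by norm_num),
        if_pos (show (-1:Int) < 0 by norm_num)]

theorem pv_neg_dia_irrelevant_B (dia mes : Int) (h : dia < 0) :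
    corrigir_dia_e_mes_alt dia mes = corrigir_dia_e_mes_alt (-1) mes := by
  simp only [corrigir_dia_e_mes_alt]
  rw [if_pos h, if_pos (show (-1:Int) < 0 by norm_num)]

set_option maxRecDepth 2048 in
theorem pv_neg_all : ((PySem.List.pyRange (-11) 12).all (fun mes =>
    corrigir_dia_e_mes (-1) mes == corrigir_dia_e_mes_alt (-1) mes)) = true := by decide

theorem pv_neg_case (dia mes : Int) (h : dia < 0) (h1 : -11 ≤ mes) (h2 : mes ≤ 11) :
    corrigir_dia_e_mes dia mes = corrigir_dia_e_mes_alt dia mes := by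
  have hm : mes ∈ PySem.List.pyRange (-11) 12 :=
    PySem.List.mem_pyRange_one.mpr (by omega)
  have hbase := eq_of_beq (List.all_eq_true.mp pv_neg_all mes hm)
  calc corrigir_dia_e_mes dia mes
      = corrigir_dia_e_mes (-1) mes := pv_neg_dia_irrelevant_A 99 dia mes h
    _ = corrigir_dia_e_mes_alt (-1) mes := hbase
    _ = corrigir_dia_e_mes_alt dia mes := (pv_neg_dia_irrelevant_B dia mes h).symm

-- ===== VERDICT (by name: the statement is the Claim_ definition above) =====
theorem corrigir_dia_e_mes_spec : Claim_equal_corrigir_dia_e_mes := by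
  intro dia mes _ hpre
  unfold Spec_corrigir_dia_e_mes
  unfold Pre_corrigir_dia_e_mes at hpre
  by_cases hneg : dia < 0
  · rw [if_pos hneg] at hpre
    exact pv_neg_case dia mes hneg hpre.1 hpre.2
  · by_cases h0 : dia = 0
    · subst h0
      rw [if_neg hneg, if_pos rfl] at hpre
      have hm : mes ∈ PySem.List.pyRange (-12) 11 :=
        PySem.List.mem_pyRange_one.mpr (by omega)
      exact eq_of_beq (List.all_eq_true.mp pv_zero_all mes hm)
    · rw [if_neg hneg, if_neg h0] at hpre
      have hm : mes ∈ PySem.List.pyRange (-12) 12 :=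
        PySem.List.mem_pyRange_one.mpr (by omega)
      have hd : dia ∈ PySem.List.pyRange 1 (pvResto.getD (mes + 12).toNat 0 + 1) :=
        PySem.List.mem_pyRange_one.mpr (by omega)
      exact eq_of_beq (List.all_eq_true.mp (List.all_eq_true.mp pv_pos_all mes hm) dia hd)
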